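-- pv_equiv track=rewrite | github.com/pypi-data/pypi-mirror-14 | packages/msstitch/msstitch-1.0.tar.gz/msstitch-1.0/src/app/actions/mslookup/searchspace.py | trypsinize
-- ===== SOURCE A (Python) =====
-- def trypsinize(proseq, proline_cut=False):
--     # TODO add cysteine to non cut options, use enums
--     """Trypsinize a protein sequence. Returns a list of peptides.
--     Peptides include both cut and non-cut when P is behind a tryptic
--     residue. Multiple consequent tryptic residues are treated as follows:
--     PEPKKKTIDE - [PEPK, PEPKK, PEPKKK, KKTIDE, KTIDE, TIDE, K, K, KK ]
--     """
--     outpeps = []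
--     currentpeps = ['']
--     trypres = set(['K', 'R'])
--     noncutters = set()
--     if not proline_cut:
--         noncutters.add('P')
--     for i, aa in enumerate(proseq):
--         currentpeps = ['{0}{1}'.format(x, aa) for x in currentpeps]
--         if i == len(proseq) - 1:
--             continue
--         if aa in trypres and proseq[i + 1] not in noncutters:
--             outpeps.extend(currentpeps)  # do actual cut by storing peptides
--             if proseq[i + 1] in trypres.union('P'):
--                 # add new peptide to list if we are also to run on
--                 currentpeps.append('')
--             elif trypres.issuperset(currentpeps[-1]):
--                 currentpeps = [x for x in currentpeps if trypres.issuperset(x)]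
--                 currentpeps.append('')
--             else:
--                 currentpeps = ['']
--
--     if currentpeps != ['']:
--         outpeps.extend(currentpeps)
--     return outpeps
-- ===== SOURCE B (Python) =====
-- def trypsinize(proseq, proline_cut=False):
--     """Trypsinize a protein sequence into peptides (missed-cleavage handling
--     identical to the original), but tracking start indices of the active
--     peptides and slicing only when a peptide is emitted, instead of
--     rebuilding every active peptide string at each character."""
--     n = len(proseq)
--     outpeps = []
--     starts = [0]          # start index of each active (growing) peptide
--     trypres = ('K', 'R')
--     last_non = -1         # last index < i holding a non-tryptic residue
--     for i in range(n - 1):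
--         aa = proseq[i]
--         if aa not in trypres:
--             last_non = i
--         if aa in trypres and (proline_cut or proseq[i + 1] != 'P'):
--             nxt = proseq[i + 1]
--             outpeps.extend(proseq[s:i + 1] for s in starts)
--             if nxt in ('K', 'R', 'P'):
--                 starts.append(i + 1)
--             elif starts[-1] > last_non:
--                 # shortest active peptide is all-tryptic: keep those
--                 starts = [s for s in starts if s > last_non]
--                 starts.append(i + 1)
--             else:
--                 starts = [i + 1]
--     if n > 0:
--         outpeps.extend(proseq[s:] for s in starts)
--     return outpeps
-- ===== Notes on version B (the rewrite author's own statement) =====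
-- stated objective: faster
-- what changed: Instead of rebuilding every active peptide string at each character (and filtering/last-checking on the strings), B tracks only the start indices of the active peptides plus the last non-tryptic position, and slices each peptide out of the sequence once, when it is emitted.
import Mathlib
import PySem

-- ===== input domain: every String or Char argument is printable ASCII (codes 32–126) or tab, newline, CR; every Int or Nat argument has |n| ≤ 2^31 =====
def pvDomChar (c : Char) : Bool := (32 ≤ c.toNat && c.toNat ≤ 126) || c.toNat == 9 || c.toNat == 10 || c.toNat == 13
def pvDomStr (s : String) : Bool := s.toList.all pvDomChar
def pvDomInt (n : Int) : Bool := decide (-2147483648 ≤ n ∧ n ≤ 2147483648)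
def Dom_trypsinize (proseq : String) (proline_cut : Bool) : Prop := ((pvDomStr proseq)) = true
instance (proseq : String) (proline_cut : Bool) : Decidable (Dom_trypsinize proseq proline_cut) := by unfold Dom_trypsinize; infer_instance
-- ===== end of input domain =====

-- B tracks start indices of active peptides and slices only on emission, instead of
-- rebuilding every active peptide string at each character: asymptotically faster, same output.

-- ===== PORT A =====
-- the for-loop of A: state (outpeps, currentpeps); strings handled as List Char
-- ('{0}{1}'.format(x, aa) = x ++ [aa]); the 'i == len-1: continue' test is 'rest = []'.
def trypLoopA (pc : Bool) : List Char → List (List Char) → List (List Char) →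
    List (List Char) × List (List Char)
  | [], out, curr => (out, curr)
  | aa :: rest, out, curr =>
    let curr' := curr.map (fun x => x ++ [aa])
    match rest with
    | [] => (out, curr')                  -- i == len(proseq) - 1 : continue (loop ends)
    | nx :: _ =>
      if (aa == 'K' || aa == 'R') && (pc || !(nx == 'P')) then
        let out' := out ++ curr'
        if nx == 'K' || nx == 'R' || nx == 'P' then
          trypLoopA pc rest out' (curr' ++ [[]])
        else if (curr'.getLastD []).all (fun c => c == 'K' || c == 'R') then
          trypLoopA pc rest out'
            ((curr'.filter (fun x => x.all (fun c => c == 'K' || c == 'R'))) ++ [[]])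
        else
          trypLoopA pc rest out' [[]]
      else trypLoopA pc rest out curr'

def trypsinize (proseq : String) (proline_cut : Bool) : List String :=
  let l := proseq.toList
  let r := trypLoopA proline_cut l [] [[]]
  let res := if r.2 ≠ [[]] then r.1 ++ r.2 else r.1
  res.map (fun cs => String.mk cs)

-- ===== PORT B =====
-- the for-loop of B (Source B): 'for i in range(n-1)' as structural recursion on the number of
-- remaining iterations; state (outpeps, starts, last_non).  proseq[s:i+1] with
-- 0 ≤ s ≤ i+1 is exactly (l.take (i+1)).drop s.
def trypLoopB (l : List Char) (pc : Bool) : Nat → Nat → List (List Char) → List Nat → Int →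
    List (List Char) × List Nat
  | 0, _, out, starts, _ => (out, starts)
  | fuel + 1, i, out, starts, lastNon =>
    let aa := l.getD i ' '
    let lastNon' := if aa == 'K' || aa == 'R' then lastNon else (i : Int)
    if (aa == 'K' || aa == 'R') && (pc || !(l.getD (i+1) ' ' == 'P')) then
      let nx := l.getD (i+1) ' '
      let out' := out ++ starts.map (fun s => (l.take (i+1)).drop s)
      if nx == 'K' || nx == 'R' || nx == 'P' then
        trypLoopB l pc fuel (i+1) out' (starts ++ [i+1]) lastNon'
      else if lastNon' < ((starts.getLastD 0 : Nat) : Int) then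
        trypLoopB l pc fuel (i+1) out'
          ((starts.filter (fun (s : Nat) => decide (lastNon' < (s : Int)))) ++ [i+1]) lastNon'
      else
        trypLoopB l pc fuel (i+1) out' [i+1] lastNon'
    else trypLoopB l pc fuel (i+1) out starts lastNon'

def trypsinize_alt (proseq : String) (proline_cut : Bool) : List String :=
  let l := proseq.toList
  let n := l.length
  let r := trypLoopB l proline_cut (n - 1) 0 [] [0] (-1)
  let res := if 0 < n then r.1 ++ r.2.map (fun s => l.drop s) else r.1
  res.map (fun cs => String.mk cs)

-- ===== PRECONDITION & SPEC =====
def Spec_trypsinize (proseq : String) (proline_cut : Bool) (out : List String) : Prop := out = trypsinize_alt proseq proline_cut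
instance (proseq : String) (proline_cut : Bool) (out : List String) : Decidable (Spec_trypsinize proseq proline_cut out) := by unfold Spec_trypsinize; infer_instance

-- ===== CLAIM (what is proved, stated in full; the proofs are below) =====
def Claim_equal_trypsinize : Prop := ∀ (proseq : String) (proline_cut : Bool), Dom_trypsinize proseq proline_cut → Spec_trypsinize proseq proline_cut (trypsinize proseq proline_cut)

-- ===== LEMMAS AND PROOFS =====

lemma seg_succ (l : List Char) (i s : Nat) (hs : s ≤ i) (hi : i < l.length) :
    ((l.take i).drop s) ++ [l.getD i ' '] = (l.take (i+1)).drop s := by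
  rw [List.take_succ]
  rw [List.drop_append]
  have : s - (l.take i).length = 0 := by simp only [List.length_take]; omega
  rw [this]
  simp [List.getD, List.getElem?_eq_getElem hi]

lemma getLastD_map (f : Nat → List Char) (xs : List Nat) (hx : xs ≠ []) :
    (xs.map f).getLastD [] = f (xs.getLastD 0) := by
  induction xs with
  | nil => simp at hx
  | cons a t ih =>
    cases t with
    | nil => simp
    | cons b t' => simpa using ih (by simp)

lemma getLastD_mem (xs : List Nat) (hx : xs ≠ []) : xs.getLastD 0 ∈ xs := by
  induction xs with
  | nil => simp at hx
  | cons a t ih =>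
    cases t with
    | nil => simp
    | cons b t' => simpa using Or.inr (ih (by simp))

lemma all_seg (l : List Char) (p : Char → Bool) (s b : Nat) (hb : b ≤ l.length) :
    (((l.take b).drop s).all p = true) ↔ ∀ j, s ≤ j → j < b → p (l.getD j ' ') = true := by
  rw [List.all_eq_true]
  constructor
  · intro h j hsj hjb
    have hjl : j < l.length := by omega
    have hmem : l[j] ∈ (l.take b).drop s := by
      rw [List.mem_iff_getElem]
      refine ⟨j - s, by simp [List.length_drop, List.length_take]; omega, ?_⟩
      rw [List.getElem_drop, List.getElem_take]
      congr 1; omega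
    have := h _ hmem
    simpa [List.getD, List.getElem?_eq_getElem hjl] using this
  · intro h c hc
    rw [List.mem_iff_getElem] at hc
    obtain ⟨t, ht, rfl⟩ := hc
    rw [List.getElem_drop, List.getElem_take]
    have htl : s + t < l.length := by
      simp [List.length_drop, List.length_take] at ht; omega
    have := h (s + t) (by omega) (by simp [List.length_drop, List.length_take] at ht; omega)
    simpa [List.getD, List.getElem?_eq_getElem htl] using this


lemma trypLoopA_one (pc : Bool) (aa : Char) (out curr : List (List Char)) :
    trypLoopA pc [aa] out curr = (out, curr.map (fun x => x ++ [aa])) := rfl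

lemma trypLoopA_cons2 (pc : Bool) (aa nx : Char) (rest : List Char)
    (out curr : List (List Char)) :
    trypLoopA pc (aa :: nx :: rest) out curr =
      (if (aa == 'K' || aa == 'R') && (pc || !(nx == 'P')) then
        if nx == 'K' || nx == 'R' || nx == 'P' then
          trypLoopA pc (nx :: rest) (out ++ curr.map (fun x => x ++ [aa]))
            (curr.map (fun x => x ++ [aa]) ++ [[]])
        else if ((curr.map (fun x => x ++ [aa])).getLastD []).all
            (fun c => c == 'K' || c == 'R') then
          trypLoopA pc (nx :: rest) (out ++ curr.map (fun x => x ++ [aa]))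
            ((curr.map (fun x => x ++ [aa])).filter
              (fun x => x.all (fun c => c == 'K' || c == 'R')) ++ [[]])
        else
          trypLoopA pc (nx :: rest) (out ++ curr.map (fun x => x ++ [aa])) [[]]
      else trypLoopA pc (nx :: rest) out (curr.map (fun x => x ++ [aa]))) := rfl

lemma loopB_starts_le (l : List Char) (pc : Bool) :
    ∀ (fuel i : Nat) (out : List (List Char)) (starts : List Nat) (lastNon : Int),
      (∀ s ∈ starts, s ≤ i) →
      ∀ s ∈ (trypLoopB l pc fuel i out starts lastNon).2, s ≤ i + fuel := by
  intro fuel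
  induction fuel with
  | zero =>
    intro i out starts lastNon h s hs
    simp only [trypLoopB] at hs
    simpa using h s hs
  | succ f ih =>
    intro i out starts lastNon h s hs
    have step : ∀ (out' : List (List Char)) (starts' : List Nat) (ln' : Int),
        (∀ t ∈ starts', t ≤ i+1) → s ∈ (trypLoopB l pc f (i+1) out' starts' ln').2 →
        s ≤ i + (f+1) := by
      intro out' starts' ln' h' hs'
      have := ih (i+1) out' starts' ln' h' s hs'
      omega
    simp only [trypLoopB] at hs
    by_cases hT : (l.getD i ' ' == 'K' || l.getD i ' ' == 'R') = true
    · rw [if_pos hT] at hs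
      repeat' split at hs
      all_goals refine step _ _ _ ?_ hs
      all_goals intro t ht
      all_goals first
        | exact Nat.le_succ_of_le (h t ht)
        | (rcases List.mem_append.1 ht with h1 | h1
           · first
              | exact Nat.le_succ_of_le (h t h1)
              | exact Nat.le_succ_of_le (h t (List.mem_of_mem_filter h1))
           · simp at h1; omega)
        | (simp at ht; omega)
    · rw [if_neg hT] at hs
      repeat' split at hs
      all_goals refine step _ _ _ ?_ hs
      all_goals intro t ht
      all_goals first
        | exact Nat.le_succ_of_le (h t ht)
        | (rcases List.mem_append.1 ht with h1 | h1
           · first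
              | exact Nat.le_succ_of_le (h t h1)
              | exact Nat.le_succ_of_le (h t (List.mem_of_mem_filter h1))
           · simp at h1; omega)
        | (simp at ht; omega)

lemma loop_agree (pc : Bool) (l : List Char) :
    ∀ (fuel i : Nat) (out : List (List Char)) (starts : List Nat) (lastNon : Int),
      i + fuel + 1 = l.length →
      starts ≠ [] →
      (∀ s ∈ starts, s ≤ i) →
      (∀ j : Nat, lastNon < (j : Int) → j < i →
        (l.getD j ' ' == 'K' || l.getD j ' ' == 'R') = true) →
      (∀ j : Nat, (j : Int) = lastNon →
        (l.getD j ' ' == 'K' || l.getD j ' ' == 'R') = false) →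
      lastNon < (i : Int) →
      trypLoopA pc (l.drop i) out (starts.map (fun s => (l.take i).drop s)) =
        ((trypLoopB l pc fuel i out starts lastNon).1,
         (trypLoopB l pc fuel i out starts lastNon).2.map (fun s => l.drop s)) := by
  intro fuel
  induction fuel with
  | zero =>
    intro i out starts lastNon hlen hne hle hgood hbad hlt
    have hi : i < l.length := by omega
    have hdrop : l.drop i = [l.getD i ' '] := by
      rw [List.drop_eq_getElem_cons hi]
      have : l.drop (i+1) = [] := List.drop_eq_nil_of_le (by omega)
      rw [this]
      simp [List.getD, List.getElem?_eq_getElem hi]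
    rw [hdrop, trypLoopA_one]
    simp only [trypLoopB, List.map_map]
    congr 1
    refine List.map_congr_left ?_
    intro s hs
    have hsle := hle s hs
    simp only [Function.comp_apply]
    rw [seg_succ l i s hsle hi]
    have : i + 1 = l.length := by omega
    rw [this, List.take_length]
  | succ fuel ih =>
    intro i out starts lastNon hlen hne hle hgood hbad hlt
    have hi : i < l.length := by omega
    have hi1 : i + 1 < l.length := by omega
    have hdropi : l.drop i = l.getD i ' ' :: l.drop (i+1) := by
      rw [List.drop_eq_getElem_cons hi]
      simp [List.getD, List.getElem?_eq_getElem hi]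
    have hdropi1 : l.drop (i+1) = l.getD (i+1) ' ' :: l.drop (i+2) := by
      rw [List.drop_eq_getElem_cons hi1]
      simp [List.getD, List.getElem?_eq_getElem hi1]
    set aa := l.getD i ' ' with haa
    set nx := l.getD (i+1) ' ' with hnx
    have hcurr' : (starts.map (fun s => (l.take i).drop s)).map (fun x => x ++ [aa]) =
        starts.map (fun s => (l.take (i+1)).drop s) := by
      rw [List.map_map]
      refine List.map_congr_left ?_
      intro s hs
      simp only [Function.comp_apply]
      exact seg_succ l i s (hle s hs) hi
    have hsegself : (l.take (i+1)).drop (i+1) = [] :=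
      List.drop_eq_nil_of_le (by simp [List.length_take])
    rw [hdropi, hdropi1, trypLoopA_cons2, ← hdropi1]
    simp only [trypLoopB]
    rw [← haa, ← hnx, hcurr']
    by_cases htryp : (aa == 'K' || aa == 'R') = true
    · rw [if_pos htryp]
      have hgood1 : ∀ j : Nat, lastNon < (j : Int) → j < i + 1 →
          (l.getD j ' ' == 'K' || l.getD j ' ' == 'R') = true := by
        intro j h1 h2
        by_cases hj : j < i
        · exact hgood j h1 hj
        · have hji : j = i := by omega
          rw [hji, ← haa]; exact htryp
      by_cases hcut : ((aa == 'K' || aa == 'R') && (pc || !(nx == 'P'))) = true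
      · rw [if_pos hcut, if_pos hcut]
        have hiff : ∀ s ∈ starts,
            ((((l.take (i+1)).drop s).all (fun c => c == 'K' || c == 'R')) = true ↔
              lastNon < (s : Int)) := by
          intro s hs
          rw [all_seg l _ s (i+1) (by omega)]
          constructor
          · intro hall
            by_contra hcon
            push_neg at hcon
            have h0 : (0:Int) ≤ lastNon := le_trans (Int.natCast_nonneg s) hcon
            have hjn : ((lastNon.toNat : Int)) = lastNon := Int.toNat_of_nonneg h0
            have h1 := hall lastNon.toNat (by omega) (by omega)
            have h2 := hbad lastNon.toNat hjn
            rw [h1] at h2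
            simp at h2
          · intro hlts j hsj hji
            exact hgood1 j (lt_of_lt_of_le hlts (by exact_mod_cast hsj)) hji
        by_cases hnxk : (nx == 'K' || nx == 'R' || nx == 'P') = true
        · rw [if_pos hnxk, if_pos hnxk]
          have hmapnew : starts.map (fun s => (l.take (i+1)).drop s) ++ [[]] =
              (starts ++ [i+1]).map (fun s => (l.take (i+1)).drop s) := by
            simp [hsegself]
          rw [hmapnew]
          refine ih (i+1) _ (starts ++ [i+1]) lastNon (by omega) (by simp) ?_ hgood1 hbad (by omega)
          intro s hs
          rcases List.mem_append.1 hs with h1 | h1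
          · exact Nat.le_succ_of_le (hle s h1)
          · simp at h1; omega
        · rw [if_neg hnxk, if_neg hnxk]
          have hlastmem := getLastD_mem starts hne
          have hlastD : (starts.map (fun s => (l.take (i+1)).drop s)).getLastD [] =
              (l.take (i+1)).drop (starts.getLastD 0) :=
            getLastD_map _ starts hne
          rw [hlastD]
          by_cases hlast : lastNon < ((starts.getLastD 0 : Nat) : Int)
          · rw [if_pos ((hiff _ hlastmem).mpr hlast), if_pos hlast]
            have hpq : ∀ s ∈ starts,
                (((l.take (i+1)).drop s).all (fun c => c == 'K' || c == 'R'))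
                  = decide (lastNon < (s : Int)) := by
              intro s hs
              rcases hiff s hs with ⟨h1, h2⟩
              by_cases hq : lastNon < (s : Int)
              · simp [h2 hq, hq]
              · have hfs : (((l.take (i+1)).drop s).all (fun c => c == 'K' || c == 'R')) = false := by
                  by_contra hc
                  simp only [Bool.not_eq_false] at hc
                  exact hq (h1 hc)
                simp [hfs, hq]
            have hfilter : (starts.map (fun s => (l.take (i+1)).drop s)).filter
                  (fun x => x.all (fun c => c == 'K' || c == 'R')) ++ [[]] =
                ((starts.filter (fun (s : Nat) => decide (lastNon < (s : Int)))) ++ [i+1]).map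
                  (fun s => (l.take (i+1)).drop s) := by
              rw [List.filter_map]
              have hcng : starts.filter ((fun x => x.all (fun c => c == 'K' || c == 'R')) ∘
                    (fun s => (l.take (i+1)).drop s)) =
                  starts.filter (fun (s : Nat) => decide (lastNon < (s : Int))) :=
                List.filter_congr (by intro s hs; simpa using hpq s hs)
              rw [hcng]
              simp [hsegself]
            rw [hfilter]
            refine ih (i+1) _ _ lastNon (by omega) (by simp) ?_ hgood1 hbad (by omega)
            intro s hs
            rcases List.mem_append.1 hs with h1 | h1
            · exact Nat.le_succ_of_le (hle s (List.mem_of_mem_filter h1))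
            · simp at h1; omega
          · rw [if_neg (fun hc => hlast ((hiff _ hlastmem).mp hc)), if_neg hlast]
            have hone : ([([] : List Char)]) =
                ([i+1] : List Nat).map (fun s => (l.take (i+1)).drop s) := by
              simp [hsegself]
            rw [hone]
            refine ih (i+1) _ _ lastNon (by omega) (by simp) ?_ hgood1 hbad (by omega)
            intro s hs; simp at hs; omega
      · rw [if_neg hcut, if_neg hcut]
        exact ih (i+1) _ _ lastNon (by omega) hne
          (fun s hs => Nat.le_succ_of_le (hle s hs)) hgood1 hbad (by omega)
    · have hf : (aa == 'K' || aa == 'R') = false := by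
        simpa using htryp
      rw [if_neg htryp]
      have hcutf : ¬ (((aa == 'K' || aa == 'R') && (pc || !(nx == 'P'))) = true) := by
        simp [hf]
      rw [if_neg hcutf, if_neg hcutf]
      refine ih (i+1) _ _ _ (by omega) hne
        (fun s hs => Nat.le_succ_of_le (hle s hs)) ?_ ?_ (by omega)
      · intro j h1 h2; omega
      · intro j hj
        have hji : j = i := by exact_mod_cast hj
        rw [hji, ← haa]
        simpa using htryp

-- ===== VERDICT (by name: the statement is the Claim_ definition above) =====
theorem trypsinize_spec : Claim_equal_trypsinize := by
  intro proseq pc _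
  unfold Spec_trypsinize trypsinize trypsinize_alt
  set l := proseq.toList with hldef
  simp only []
  rcases eq_or_ne l [] with hnil | hne
  · rw [hnil]
    rfl
  · have hlen : 0 < l.length := List.length_pos_iff.mpr hne
    have hmain := loop_agree pc l (l.length - 1) 0 [] [0] (-1) (by omega) (by simp)
      (by simp) (by intro j h1 h2; exact absurd h2 (by omega))
      (by intro j hj; exact absurd hj (by omega)) (by omega)
    have h0 : ([0] : List Nat).map (fun s => (l.take 0).drop s) = [[]] := by simp
    rw [List.drop_zero, h0] at hmain
    have hlt := loopB_starts_le l pc (l.length - 1) 0 [] [0] (-1) (by simp)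
    set rB := trypLoopB l pc (l.length - 1) 0 [] [0] (-1) with hrB
    have hcond : rB.2.map (fun s => l.drop s) ≠ [[]] := by
      intro hc
      have hmem : ([] : List Char) ∈ rB.2.map (fun s => l.drop s) := by rw [hc]; simp
      rcases List.mem_map.1 hmem with ⟨s, hsmem, hseq⟩
      have hb := hlt s hsmem
      have hlens : l.length - s = 0 := by
        have := congrArg List.length hseq
        simpa [List.length_drop] using this
      omega
    rw [hmain]
    simp only [if_pos hcond, if_pos hlen]
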